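-- pv_equiv track=rewrite | github.com/henriksson-lab/minimap2-pure-rs | scripts/parity_matrix.py | paf_core
-- ===== SOURCE A (Python) =====
-- def paf_core(lines: list[str]) -> list[str]:
--     normalized = []
--     for line in lines:
--         fields = line.split("\t")
--         tags = {}
--         for field in fields[12:]:
--             parts = field.split(":", 2)
--             if len(parts) == 3:
--                 tags[parts[0]] = field
--         selected_tags = [tags[tag] for tag in ("tp", "cm", "s1", "s2", "rl") if tag in tags]
--         normalized.append("\t".join([*fields[:12], *selected_tags]))
--     return normalized
-- ===== SOURCE B (Python) =====
-- def paf_core(lines: list[str]) -> list[str]: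
--     out = []
--     for line in lines:
--         fields = line.split("\t")
--         core = fields[:12]
--         for tag in ("tp", "cm", "s1", "s2", "rl"):
--             for field in reversed(fields[12:]):
--                 parts = field.split(":", 2)
--                 if len(parts) == 3 and parts[0] == tag:
--                     core.append(field)
--                     break
--         out.append("\t".join(core))
--     return out
-- ===== Notes on version B (the rewrite author's own statement) =====
-- stated objective: alternative
-- what changed: Instead of building a dict of all tags and then selecting, B scans fields[12:] in reverse once per wanted tag and takes the first (i.e. last-occurring) matching field, so no dict is maintained.
import Mathlib
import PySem

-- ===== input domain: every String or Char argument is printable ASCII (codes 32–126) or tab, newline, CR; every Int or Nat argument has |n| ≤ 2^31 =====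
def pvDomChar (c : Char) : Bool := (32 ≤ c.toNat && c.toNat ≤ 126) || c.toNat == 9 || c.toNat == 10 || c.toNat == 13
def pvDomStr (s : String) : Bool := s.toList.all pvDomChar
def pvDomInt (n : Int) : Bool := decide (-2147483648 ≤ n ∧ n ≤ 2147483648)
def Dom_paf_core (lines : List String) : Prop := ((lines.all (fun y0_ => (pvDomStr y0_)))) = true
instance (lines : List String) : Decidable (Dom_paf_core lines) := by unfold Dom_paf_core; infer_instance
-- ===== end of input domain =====

-- B changes the decomposition (a reverse scan per wanted tag instead of a dict of all tags); same results, similar cost.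

-- ===== PORT A =====
def paf_core (lines : List String) : List String :=
  lines.foldl (fun normalized line =>
    let fields := (PySem.Str.split? line "\t").getD []
    let tags := (PySem.List.slice fields (some 12) none).foldl (fun tags field =>
      match PySem.Str.splitMax? field ":" 2 with
      | some parts =>
          if parts.length = 3 then tags.insert (PySem.List.pyGetD parts 0 "") field else tags
      | none => tags) PySem.Dict.empty
    let selected := ["tp", "cm", "s1", "s2", "rl"].filterMap (fun tag => tags.get? tag)
    normalized ++ [PySem.Str.join "\t" (PySem.List.slice fields none (some 12) ++ selected)]) []

-- ===== PORT B =====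
def pafMatches (field tag : String) : Bool :=
  match PySem.Str.splitMax? field ":" 2 with
  | some parts => parts.length == 3 && PySem.List.pyGetD parts 0 "" == tag
  | none => false

def paf_core_alt (lines : List String) : List String :=
  lines.map (fun line =>
    let fields := (PySem.Str.split? line "\t").getD []
    let rest := PySem.List.slice fields (some 12) none
    let sel := ["tp", "cm", "s1", "s2", "rl"].filterMap
      (fun tag => rest.reverse.find? (fun f => pafMatches f tag))
    PySem.Str.join "\t" (PySem.List.slice fields none (some 12) ++ sel))

-- ===== PRECONDITION & SPEC =====
def Spec_paf_core (lines : List String) (out : List String) : Prop := out = paf_core_alt lines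
instance (lines : List String) (out : List String) : Decidable (Spec_paf_core lines out) := by unfold Spec_paf_core; infer_instance

-- ===== CLAIM (what is proved, stated in full; the proofs are below) =====
def Claim_equal_paf_core : Prop := ∀ (lines : List String), Dom_paf_core lines → Spec_paf_core lines (paf_core lines)

-- ===== LEMMAS AND PROOFS =====

-- A's tag dict, looked up at `tag`, is the last matching field of the scanned list.
theorem pafDict_get (tag : String) (rest : List String) (d : PySem.Dict String String) :
    (rest.foldl (fun tags field =>
      match PySem.Str.splitMax? field ":" 2 with
      | some parts =>
          if parts.length = 3 then tags.insert (PySem.List.pyGetD parts 0 "") field else tags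
      | none => tags) d).get? tag
    = ((rest.reverse.find? (fun f => pafMatches f tag)).elim (d.get? tag) some) := by
  induction rest generalizing d with
  | nil => rfl
  | cons f rest ih =>
      simp only [List.foldl_cons, ih, List.reverse_cons, List.find?_append]
      cases hfind : rest.reverse.find? (fun f => pafMatches f tag) with
      | some g => simp
      | none =>
          simp only [Option.none_or, List.find?_singleton]
          unfold pafMatches
          cases hs : PySem.Str.splitMax? f ":" 2 with
          | none => simp
          | some parts =>
              by_cases h3 : parts.length = 3
              · by_cases he : PySem.List.pyGetD parts 0 "" = tag
                · simp [h3, he, PySem.Dict.get?_insert_self]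
                · simp [h3, PySem.Dict.get?_insert, Ne.symm he, he]
              · simp [h3]

theorem elim_none_some {α : Type} (o : Option α) : o.elim none some = o := by
  cases o <;> rfl

theorem foldl_append_map {α β : Type} (g : α → β) (l : List α) (acc : List β) :
    l.foldl (fun a x => a ++ [g x]) acc = acc ++ l.map g := by
  induction l generalizing acc with
  | nil => simp
  | cons x l ih => simp [ih]

-- ===== VERDICT (by name: the statement is the Claim_ definition above) =====
theorem paf_core_spec : Claim_equal_paf_core := by
  intro lines _
  unfold Spec_paf_core paf_core paf_core_alt
  rw [foldl_append_map]
  simp only [List.nil_append]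
  refine List.map_congr_left (fun line _ => ?_)
  simp only [pafDict_get, PySem.Dict.get?_empty, elim_none_some]
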